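-- pv_equiv track=rewrite | github.com/TH3PL4Y3R1/n_back | nback_task.py | _valid_run_limit
-- ===== SOURCE A (Python) =====
-- from typing import List, Dict, Optional, Tuple
--
-- def _valid_run_limit(seq: List[str], candidate: str, max_run: int) -> bool:
--     if max_run <= 0:
--         return True
--     run_len = 1
--     i = len(seq) - 1
--     while i >= 0 and seq[i] == candidate:
--         run_len += 1
--         i -= 1
--     return run_len <= max_run
-- ===== SOURCE B (Python) =====
-- def _valid_run_limit(seq, candidate, max_run):
--     if max_run <= 0:
--         return True
--     tail = seq[-max_run:]
--     return not (len(tail) == max_run and all(x == candidate for x in tail))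
-- ===== Notes on version B (the rewrite author's own statement) =====
-- stated objective: simpler
-- what changed: Replaces the backward run-counting while loop with a fixed-window check: slice the last max_run elements and test with all() whether the full window equals the candidate.
import Mathlib
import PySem

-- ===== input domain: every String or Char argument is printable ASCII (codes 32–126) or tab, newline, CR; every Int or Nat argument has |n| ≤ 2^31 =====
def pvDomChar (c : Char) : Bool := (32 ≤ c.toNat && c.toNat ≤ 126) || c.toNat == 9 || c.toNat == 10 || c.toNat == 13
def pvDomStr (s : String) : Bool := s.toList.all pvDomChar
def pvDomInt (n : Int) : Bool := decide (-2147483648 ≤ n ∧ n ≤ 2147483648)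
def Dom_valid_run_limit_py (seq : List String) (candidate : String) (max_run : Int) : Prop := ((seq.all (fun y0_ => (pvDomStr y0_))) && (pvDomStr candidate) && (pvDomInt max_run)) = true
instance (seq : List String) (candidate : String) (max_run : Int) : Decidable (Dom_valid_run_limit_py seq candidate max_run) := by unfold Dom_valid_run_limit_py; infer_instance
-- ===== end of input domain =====

-- ===== PORT A =====
-- backward while loop of A: n = i+1 (remaining indices), run = run_len
def aLoop (seq : List String) (candidate : String) : Nat → Int → Int
  | 0, run => run
  | n+1, run =>
    match PySem.List.pyGet? seq (n : Int) with
    | some x => if x == candidate then aLoop seq candidate n (run + 1) else run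
    | none => run

def valid_run_limit_py (seq : List String) (candidate : String) (max_run : Int) : Bool :=
  if max_run ≤ 0 then true
  else decide (aLoop seq candidate seq.length 1 ≤ max_run)

-- ===== PORT B =====
-- B: slice the last max_run elements; valid unless the full window equals candidate
def valid_run_limit_py_alt (seq : List String) (candidate : String) (max_run : Int) : Bool :=
  if max_run ≤ 0 then true
  else
    let tail := PySem.List.slice seq (some (-max_run)) none
    !(decide ((tail.length : Int) = max_run) && tail.all (· == candidate))

-- ===== PRECONDITION & SPEC =====
def Spec_valid_run_limit_py (seq : List String) (candidate : String) (max_run : Int) (out : Bool) : Prop := out = valid_run_limit_py_alt seq candidate max_run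
instance (seq : List String) (candidate : String) (max_run : Int) (out : Bool) : Decidable (Spec_valid_run_limit_py seq candidate max_run out) := by unfold Spec_valid_run_limit_py; infer_instance

-- ===== CLAIM (what is proved, stated in full; the proofs are below) =====
def Claim_equal_valid_run_limit_py : Prop := ∀ (seq : List String) (candidate : String) (max_run : Int), Dom_valid_run_limit_py seq candidate max_run → Spec_valid_run_limit_py seq candidate max_run (valid_run_limit_py seq candidate max_run)

-- ===== LEMMAS AND PROOFS =====

-- A's loop counts the trailing run of `candidate` (within the first n elements), plus the start value
theorem aLoop_eq (seq : List String) (c : String) :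
    ∀ (n : Nat), n ≤ seq.length → ∀ (run : Int),
      aLoop seq c n run = run + (((seq.take n).reverse.takeWhile (· == c)).length : Int) := by
  intro n
  induction n with
  | zero => intro _ run; simp [aLoop]
  | succ n ih =>
    intro hn run
    have hlt : n < seq.length := hn
    have hrevtake : (seq.take (n+1)).reverse = seq[n] :: (seq.take n).reverse := by
      rw [List.take_add_one, List.getElem?_eq_getElem hlt]
      simp
    rw [aLoop, PySem.List.pyGet?_natCast, List.getElem?_eq_getElem hlt]
    by_cases hc : seq[n] == c
    · simp only [hc, if_true]
      rw [ih (by omega) (run + 1), hrevtake, List.takeWhile_cons]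
      simp [hc]
      omega
    · simp only [hc]
      rw [hrevtake, List.takeWhile_cons]
      simp [hc]

-- take-all vs takeWhile length
theorem takeWhile_len_iff (c : String) :
    ∀ (l : List String) (n : Nat),
      (n ≤ (l.takeWhile (· == c)).length) ↔ (n ≤ l.length ∧ (l.take n).all (· == c)) := by
  intro l
  induction l with
  | nil => intro n; cases n <;> simp
  | cons x xs ih =>
    intro n
    cases n with
    | zero => simp
    | succ n =>
      by_cases hx : x == c
      · simp [hx, ih n]
      · simp [hx]

-- ===== VERDICT (by name: the statement is the Claim_ definition above) =====
theorem valid_run_limit_py_spec : Claim_equal_valid_run_limit_py := by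
  intro seq c m _
  unfold Spec_valid_run_limit_py valid_run_limit_py valid_run_limit_py_alt
  by_cases hm : m ≤ 0
  · simp [hm]
  · rw [if_neg hm, if_neg hm]
    have hk0 : 0 < m.toNat := by omega
    have hkm : (m.toNat : Int) = m := Int.toNat_of_nonneg (by omega)
    rw [← hkm, PySem.List.slice_from_neg_natCast seq m.toNat hk0]
    rw [aLoop_eq seq c seq.length le_rfl 1]
    simp only [List.take_length]
    set k := m.toNat with hk
    set len := seq.length with hlen
    set T := (seq.reverse.takeWhile (· == c)).length with hT
    have hTlen : T ≤ len := by
      have := (List.takeWhile_sublist (l := seq.reverse) (· == c)).length_le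
      simpa [hlen, ← hT] using this
    have hdlen : (seq.drop (len - k)).length = len - (len - k) := by
      simp [hlen]
    by_cases hklen : k ≤ len
    · have hmin : len - (len - k) = k := by omega
      have htail_all : ((seq.drop (len - k)).all (· == c)) = ((seq.reverse.take k).all (· == c)) := by
        rw [← List.all_reverse, List.reverse_drop, ← hlen, hmin]
      have hiff := takeWhile_len_iff c seq.reverse k
      simp only [List.length_reverse, ← hlen, ← hT] at hiff
      rw [hdlen, hmin] at *
      by_cases hkT : k ≤ T
      · have hall : (seq.reverse.take k).all (· == c) = true := (hiff.mp hkT).2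
        rw [htail_all, hall]
        simp
        omega
      · have hall : (seq.reverse.take k).all (· == c) = false := by
          rcases Bool.eq_false_or_eq_true ((seq.reverse.take k).all (· == c)) with h | h
          · exact absurd (hiff.mpr ⟨hklen, h⟩) hkT
          · exact h
        rw [htail_all, hall]
        simp
        omega
    · -- window longer than the sequence: both sides are `true`
      have hne : ¬ (((seq.drop (len - k)).length : Int) = (k : Int)) := by
        rw [hdlen]; omega
      simp only [decide_eq_false hne, Bool.false_and, Bool.not_false]
      have : 1 + (T : Int) ≤ (k : Int) := by omega
      simp [this]
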